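-- pv_equiv track=rewrite | github.com/syy3308/5 | data_preprocessing.py | is_valid_media_path
-- ===== SOURCE A (Python) =====
-- def is_valid_media_path(media_path):
--     """
--     判断媒体路径是否有效：长度大于3且以常见图片扩展名结尾。
--     """
--     if not media_path or len(media_path) < 3:
--         return False
--     valid_exts = ['.jpg', '.jpeg', '.png', '.bmp', '.gif']
--     for ext in valid_exts:
--         if media_path.lower().endswith(ext):
--             return True
--     return False
-- ===== SOURCE B (Python) =====
-- def is_valid_media_path(media_path):
--     """
--     判断媒体路径是否有效：长度大于3且以常见图片扩展名结尾。
--     """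
--     if not media_path or len(media_path) < 3:
--         return False
--     head, sep, tail = media_path.lower().rpartition('.')
--     return sep == '.' and tail in {'jpg', 'jpeg', 'png', 'bmp', 'gif'}
-- ===== Notes on version B (the rewrite author's own statement) =====
-- stated objective: idiomatic
-- what changed: Replaces the loop over five extension strings with endswith each iteration by a single rpartition('.') parse of the lowered path followed by one set-membership test of the extension.
import Mathlib
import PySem

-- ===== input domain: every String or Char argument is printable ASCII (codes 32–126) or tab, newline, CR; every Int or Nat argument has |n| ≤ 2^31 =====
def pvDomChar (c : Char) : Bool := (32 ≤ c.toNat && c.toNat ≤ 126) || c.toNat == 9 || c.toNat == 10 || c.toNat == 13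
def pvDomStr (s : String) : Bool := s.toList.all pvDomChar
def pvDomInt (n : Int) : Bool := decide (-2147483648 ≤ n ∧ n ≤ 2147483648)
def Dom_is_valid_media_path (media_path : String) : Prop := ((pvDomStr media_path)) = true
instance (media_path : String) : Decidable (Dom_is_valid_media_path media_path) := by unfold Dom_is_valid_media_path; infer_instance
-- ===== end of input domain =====

-- B replaces A's per-extension endswith scan by one rpartition('.') parse plus a set lookup (idiomatic, same result).

-- ===== PORT A =====
def is_valid_media_path (media_path : String) : Bool :=
  if media_path = "" || PySem.Str.len media_path < 3 then false
  else
    [".jpg", ".jpeg", ".png", ".bmp", ".gif"].any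
      (fun ext => PySem.Str.endswith (PySem.Str.lower media_path) ext)

-- ===== PORT B =====
-- rpartition('.') is ported by hand (exact): the tail is the run of non-'.' chars at the
-- end, and sep == '.' iff a '.' occurs at all.
def is_valid_media_path_alt (media_path : String) : Bool :=
  if media_path = "" || PySem.Str.len media_path < 3 then false
  else
    let low := (PySem.Str.lower media_path).toList
    let tail := (low.reverse.takeWhile (· ≠ '.')).reverse
    low.contains '.' &&
      ["jpg".toList, "jpeg".toList, "png".toList, "bmp".toList, "gif".toList].contains tail

-- ===== PRECONDITION & SPEC =====
def Spec_is_valid_media_path (media_path : String) (out : Bool) : Prop := out = is_valid_media_path_alt media_path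
instance (media_path : String) (out : Bool) : Decidable (Spec_is_valid_media_path media_path out) := by unfold Spec_is_valid_media_path; infer_instance

-- ===== CLAIM (what is proved, stated in full; the proofs are below) =====
def Claim_equal_is_valid_media_path : Prop := ∀ (media_path : String), Dom_is_valid_media_path media_path → Spec_is_valid_media_path media_path (is_valid_media_path media_path)

-- ===== LEMMAS AND PROOFS =====

-- a dot-free list followed by '.' is a prefix of r iff r contains '.' and its dot-free head is exactly a
lemma prefix_dot_iff (a r : List Char) (ha : '.' ∉ a) :
    (a ++ ['.'] <+: r) ↔ ('.' ∈ r ∧ r.takeWhile (· ≠ '.') = a) := by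
  have htw : ∀ (a : List Char), '.' ∉ a → ∀ rest,
      List.takeWhile (fun c => decide (c ≠ '.')) (a ++ '.'::rest) = a := by
    intro a ha
    induction a with
    | nil => intro rest; simp
    | cons x xs ih =>
      intro rest
      simp only [List.mem_cons, not_or] at ha
      simp only [List.cons_append, List.takeWhile_cons, decide_eq_true_eq]
      rw [if_pos (fun h => ha.1 h.symm), ih ha.2]
  constructor
  · rintro ⟨rest, hrest⟩
    subst hrest
    refine ⟨by simp, ?_⟩
    rw [List.append_assoc]
    exact htw a ha rest
  · rintro ⟨hmem, htake⟩
    have hsplit := List.takeWhile_append_dropWhile (p := fun c => decide (c ≠ '.')) (l := r)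
    have hd : r.dropWhile (fun c => decide (c ≠ '.')) ≠ [] := by
      intro hnil
      have hr : r.takeWhile (fun c => decide (c ≠ '.')) = r := by
        conv_rhs => rw [← hsplit]
        rw [hnil, List.append_nil]
      exact ha (by rw [← htake, hr]; exact hmem)
    obtain ⟨c, d, hcd⟩ := List.exists_cons_of_ne_nil hd
    have hc : c = '.' := by
      have h2 := List.head_dropWhile_not (p := fun c => decide (c ≠ '.')) (l := r) hd
      simp only [hcd, List.head_cons, decide_eq_false_iff_not, not_not] at h2
      exact h2
    refine ⟨d, ?_⟩
    rw [← hsplit, htake, hcd, hc]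
    simp

-- one extension: '.'-prefixed suffix test equals (dot present ∧ rpartition tail equals e)
lemma ext_iff (e low : List Char) (he : '.' ∉ e) :
    ('.'::e <:+ low) ↔ ('.' ∈ low ∧ (low.reverse.takeWhile (· ≠ '.')).reverse = e) := by
  rw [← List.reverse_prefix]
  have : ('.'::e).reverse = e.reverse ++ ['.'] := by simp
  rw [this, prefix_dot_iff _ _ (by simpa using he)]
  constructor
  · rintro ⟨h1, h2⟩
    exact ⟨by simpa using h1, by rw [h2]; simp⟩
  · rintro ⟨h1, h2⟩
    refine ⟨by simpa using h1, ?_⟩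
    rw [← h2]; simp

-- ===== VERDICT =====
theorem is_valid_media_path_spec : Claim_equal_is_valid_media_path := by
  intro media_path _
  unfold Spec_is_valid_media_path is_valid_media_path is_valid_media_path_alt
  split
  · rfl
  · rw [Bool.eq_iff_iff]
    simp only [List.any_cons, List.any_nil, Bool.or_eq_true, Bool.or_false,
      PySem.Str.endswith_eq, PySem.Chars.endswith_iff, Bool.and_eq_true,
      List.contains_eq_mem, decide_eq_true_eq, List.mem_cons, List.not_mem_nil, or_false]
    have h1 := ext_iff "jpg".toList (PySem.Str.lower media_path).toList (by decide)
    have h2 := ext_iff "jpeg".toList (PySem.Str.lower media_path).toList (by decide)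
    have h3 := ext_iff "png".toList (PySem.Str.lower media_path).toList (by decide)
    have h4 := ext_iff "bmp".toList (PySem.Str.lower media_path).toList (by decide)
    have h5 := ext_iff "gif".toList (PySem.Str.lower media_path).toList (by decide)
    constructor
    · rintro (h | h | h | h | h)
      · exact ⟨(h1.mp h).1, .inl (h1.mp h).2⟩
      · exact ⟨(h2.mp h).1, .inr (.inl (h2.mp h).2)⟩
      · exact ⟨(h3.mp h).1, .inr (.inr (.inl (h3.mp h).2))⟩
      · exact ⟨(h4.mp h).1, .inr (.inr (.inr (.inl (h4.mp h).2)))⟩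
      · exact ⟨(h5.mp h).1, .inr (.inr (.inr (.inr (h5.mp h).2)))⟩
    · rintro ⟨hdot, (h | h | h | h | h)⟩
      · exact .inl (h1.mpr ⟨hdot, h⟩)
      · exact .inr (.inl (h2.mpr ⟨hdot, h⟩))
      · exact .inr (.inr (.inl (h3.mpr ⟨hdot, h⟩)))
      · exact .inr (.inr (.inr (.inl (h4.mpr ⟨hdot, h⟩))))
      · exact .inr (.inr (.inr (.inr (h5.mpr ⟨hdot, h⟩))))
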